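-- pv_equiv track=rewrite | github.com/tansexe/ConnectK | bots/user_advance_bot.py | detect_column_stacking
-- ===== SOURCE A (Python) =====
-- def detect_column_stacking(board, col):
--     """Detect if a column is getting too stacked with alternating pieces"""
--     rows = len(board)
--     pieces_in_col = 0
--     alternating_pattern = 0
--
--     # Count pieces and check for alternating pattern
--     last_piece = 0
--     for row in range(rows - 1, -1, -1):
--         if board[row][col] != 0:
--             pieces_in_col += 1
--             if last_piece != 0 and board[row][col] != last_piece:
--                 alternating_pattern += 1
--             last_piece = board[row][col]
--         else:
--             break
--
--     # If column has 4+ pieces with alternating pattern, it's getting stacked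
--     return pieces_in_col >= 4 and alternating_pattern >= 2
-- ===== SOURCE B (Python) =====
-- def detect_column_stacking(board, col):
--     """Detect if a column is getting too stacked with alternating pieces"""
--     column = [row[col] for row in board]
--     if 0 in column:
--         start = len(column) - column[::-1].index(0)
--     else:
--         start = 0
--     run = column[start:]  # the filled cells above the last empty cell, top-down
--     alternations = sum(1 for a, b in zip(run, run[1:]) if a != b)
--     return len(run) >= 4 and alternations >= 2
-- ===== Notes on version B (the rewrite author's own statement) =====
-- stated objective: alternative
-- what changed: Replaces A's stateful bottom-up index loop (break at the first empty cell, threading pieces/alternations/last_piece) by a loop-free pipeline: extract the whole column top-down by a comprehension, locate the last empty cell with [::-1].index, slice the filled run off the top, and count alternations with a zip over adjacent pairs.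
-- outside the precondition, e.g. on detect_column_stacking([[], [0]], 0): A returns False, B raises IndexError
import Mathlib
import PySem

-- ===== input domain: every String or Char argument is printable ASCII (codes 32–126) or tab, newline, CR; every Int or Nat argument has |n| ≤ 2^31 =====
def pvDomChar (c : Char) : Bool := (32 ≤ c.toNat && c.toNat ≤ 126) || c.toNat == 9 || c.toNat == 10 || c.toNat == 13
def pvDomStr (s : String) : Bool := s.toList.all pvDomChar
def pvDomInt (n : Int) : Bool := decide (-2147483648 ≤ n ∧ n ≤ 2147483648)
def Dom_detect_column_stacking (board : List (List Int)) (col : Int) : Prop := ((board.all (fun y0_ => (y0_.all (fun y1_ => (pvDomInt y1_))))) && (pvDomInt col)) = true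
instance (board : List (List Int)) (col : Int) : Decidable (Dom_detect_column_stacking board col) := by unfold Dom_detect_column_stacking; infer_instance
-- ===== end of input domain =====

-- B drops A's stateful bottom-up loop entirely: it extracts the whole column by a
-- comprehension, locates the last empty cell with [::-1].index, slices the filled run
-- off the top, and counts alternations with a zip — a different decomposition, same cost.


-- ===== PORT A =====
-- the for-row loop with break: state (pieces_in_col, alternating_pattern, last_piece);
-- a 'none' from pyGet? is an IndexError in Python, excluded by Pre_ (we break there).
def pvLoopA (board : List (List Int)) (col : Int) :
    List Int → Int → Int → Int → Int × Int
  | [], pieces, alt, _ => (pieces, alt)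
  | i :: rest, pieces, alt, last =>
    match PySem.List.pyGet? board i with
    | none => (pieces, alt)
    | some row =>
      match PySem.List.pyGet? row col with
      | none => (pieces, alt)
      | some cell =>
        if cell ≠ 0 then
          pvLoopA board col rest (pieces + 1)
            (if last ≠ 0 ∧ cell ≠ last then alt + 1 else alt) cell
        else (pieces, alt)

def detect_column_stacking (board : List (List Int)) (col : Int) : Bool :=
  let rows : Int := board.length
  let st := pvLoopA board col (PySem.List.pyRange (rows - 1) (-1) (-1)) 0 0 0
  decide (st.1 ≥ 4) && decide (st.2 ≥ 2)

-- ===== PORT B =====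
-- column = [row[col] for row in board]; a 'none' (IndexError) aborts the comprehension,
-- excluded by Pre_.
def pvColumn? (col : Int) : List (List Int) → Option (List Int)
  | [] => some []
  | r :: rs =>
    match PySem.List.pyGet? r col with
    | none => none
    | some v => (pvColumn? col rs).map (v :: ·)

-- sum(1 for a, b in zip(run, run[1:]) if a != b)
def pvAltCount : List Int → Int
  | a :: b :: rest => (if a ≠ b then 1 else 0) + pvAltCount (b :: rest)
  | _ => 0

def detect_column_stacking_alt (board : List (List Int)) (col : Int) : Bool :=
  match pvColumn? col board with
  | none => false  -- IndexError in Python; outside Pre_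
  | some column =>
    -- column[::-1].index(0): guarded by '0 in column', so index? is some; getD 0 unreachable
    let start : Int :=
      if column.contains 0 then
        (column.length : Int) - (((PySem.List.index? column.reverse 0).getD 0 : Nat) : Int)
      else 0
    let run := PySem.List.slice column (some start) none   -- column[start:]
    let alternations := pvAltCount run
    decide ((run.length : Int) ≥ 4) && decide (alternations ≥ 2)

-- ===== PRECONDITION & SPEC =====
-- Pre_ excludes the inputs on which board[row][col] raises IndexError. It requires col to be a
-- valid (possibly negative) index into EVERY row; A only reads rows up to the first empty cell,
-- so on a ragged board whose out-of-range row lies above a zero A still returns — excluded only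
-- to keep the condition closed-form (B reads the whole column, so it needs all rows in range).
def Pre_detect_column_stacking (board : List (List Int)) (col : Int) : Prop :=
  ∀ row ∈ board, PySem.Raise.InRange row.length col

instance (board : List (List Int)) (col : Int) : Decidable (Pre_detect_column_stacking board col) := by
  unfold Pre_detect_column_stacking; infer_instance

def pvWitness_detect_column_stacking : List (List Int) × Int :=
  ([[2], [1], [2], [1]], 0)

def Spec_detect_column_stacking (board : List (List Int)) (col : Int) (out : Bool) : Prop := out = detect_column_stacking_alt board col
instance (board : List (List Int)) (col : Int) (out : Bool) : Decidable (Spec_detect_column_stacking board col out) := by unfold Spec_detect_column_stacking; infer_instance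

-- ===== CLAIM (what is proved, stated in full; the proofs are below) =====
def Claim_equal_detect_column_stacking : Prop := ∀ (board : List (List Int)) (col : Int), Dom_detect_column_stacking board col → Pre_detect_column_stacking board col → Spec_detect_column_stacking board col (detect_column_stacking board col)

-- ===== LEMMAS AND PROOFS =====

-- A's loop, rephrased structurally over a list of rows (bottom row first).
def pvLoopRows (col : Int) : List (List Int) → Int → Int → Int → Int × Int
  | [], pieces, alt, _ => (pieces, alt)
  | row :: rest, pieces, alt, last =>
    match PySem.List.pyGet? row col with
    | none => (pieces, alt)
    | some cell =>
      if cell ≠ 0 then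
        pvLoopRows col rest (pieces + 1)
          (if last ≠ 0 ∧ cell ≠ last then alt + 1 else alt) cell
      else (pieces, alt)

-- the bottom-up nonzero run A's loop walks over
def pvGather (col : Int) : List (List Int) → List Int
  | [] => []
  | row :: rest =>
    match PySem.List.pyGet? row col with
    | none => []
    | some cell => if cell = 0 then [] else cell :: pvGather col rest

-- Stepping indices k-1, …, 0 through board equals walking (board.take k).reverse.
lemma pvLoopA_eq_rows (board : List (List Int)) (col : Int) :
    ∀ (k : Nat), k ≤ board.length → ∀ (p a l : Int),
      pvLoopA board col (PySem.List.pyRange ((k : Int) - 1) (-1) (-1)) p a l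
        = pvLoopRows col ((board.take k).reverse) p a l := by
  intro k
  induction k with
  | zero =>
    intro _ p a l
    rw [PySem.List.pyRange_neg_one_eq_nil (by norm_num)]
    simp [pvLoopA, pvLoopRows]
  | succ k ih =>
    intro hk p a l
    have hklt : k < board.length := hk
    have hcons : PySem.List.pyRange (((k : Nat) + 1 : Int) - 1) (-1) (-1)
        = (k : Int) :: PySem.List.pyRange ((k : Int) - 1) (-1) (-1) := by
      have := PySem.List.pyRange_neg_one_cons (a := (k : Int)) (b := (-1)) (by omega)
      simpa using this
    have htake : (board.take (k + 1)).reverse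
        = board[k] :: (board.take k).reverse := by
      rw [List.take_add_one, List.getElem?_eq_getElem hklt]
      simp
    rw [show ((((k : Nat) + 1 : Nat) : Int) - 1) = (((k : Nat) + 1 : Int) - 1) by push_cast; ring,
        hcons, htake]
    have hget : PySem.List.pyGet? board (k : Int) = some board[k] := by
      simp [PySem.List.pyGet?_natCast, List.getElem?_eq_getElem hklt]
    simp only [pvLoopA, pvLoopRows, hget]
    cases hcell : PySem.List.pyGet? board[k] col with
    | none => rfl
    | some cell =>
      dsimp only
      split_ifs with hz h2
      · exact ih (Nat.le_of_lt hklt) _ _ _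
      · exact ih (Nat.le_of_lt hklt) _ _ _
      · rfl

-- The structural loop computes (p + run.length, a + alternation count relative to last).
lemma pvLoopRows_eq_gather (col : Int) :
    ∀ (rows : List (List Int)) (p a l : Int),
      pvLoopRows col rows p a l
        = (p + ((pvGather col rows).length : Int),
           a + (if l = 0 then pvAltCount (pvGather col rows)
                else pvAltCount (l :: pvGather col rows))) := by
  intro rows
  induction rows with
  | nil =>
    intro p a l
    simp [pvLoopRows, pvGather, pvAltCount]
  | cons row rest ih =>
    intro p a l
    simp only [pvLoopRows, pvGather]
    cases hcell : PySem.List.pyGet? row col with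
    | none => simp [pvAltCount]
    | some cell =>
      by_cases hz : cell = 0
      · simp [hz, pvAltCount]
      · simp only [ne_eq, hz, not_false_eq_true, if_true, ite_false]
        rw [ih]
        simp only [if_neg hz, List.length_cons, Prod.mk.injEq]
        refine ⟨by push_cast; ring, ?_⟩
        by_cases hl : l = 0
        · simp [hl, hz]
        · have hAC : pvAltCount (l :: cell :: pvGather col rest)
              = (if l ≠ cell then 1 else 0) + pvAltCount (cell :: pvGather col rest) := rfl
          rw [if_neg hl, hAC]
          by_cases hne : cell = l
          · subst hne; simp [hl]
          · have h1 : (¬l = 0 ∧ ¬cell = l) := ⟨hl, hne⟩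
            have h2 : l ≠ cell := fun h => hne h.symm
            simp [h1, h2]
            ring

-- the column value of a row (total form; under Pre_ it is exactly row[col])
def pvCell (col : Int) (r : List Int) : Int := (PySem.List.pyGet? r col).getD 0

lemma pvColumn?_eq (col : Int) :
    ∀ (rows : List (List Int)), (∀ r ∈ rows, PySem.Raise.InRange r.length col) →
      pvColumn? col rows = some (rows.map (pvCell col)) := by
  intro rows h
  induction rows with
  | nil => rfl
  | cons r rs ih =>
    have hr : PySem.Raise.InRange r.length col := h r (by simp)
    obtain ⟨v, hv⟩ : ∃ v, PySem.List.pyGet? r col = some v := by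
      cases hg : PySem.List.pyGet? r col with
      | none => exact absurd ((PySem.List.pyGet?_eq_none_iff _ _).mp hg) (not_not_intro hr)
      | some v => exact ⟨v, rfl⟩
    simp [pvColumn?, hv, ih (fun x hx => h x (by simp [hx])), pvCell]

lemma pvGather_eq_takeWhile (col : Int) :
    ∀ (rows : List (List Int)), (∀ r ∈ rows, PySem.Raise.InRange r.length col) →
      pvGather col rows = (rows.map (pvCell col)).takeWhile (fun v => decide (v ≠ 0)) := by
  intro rows h
  induction rows with
  | nil => rfl
  | cons r rs ih =>
    have hr : PySem.Raise.InRange r.length col := h r (by simp)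
    obtain ⟨v, hv⟩ : ∃ v, PySem.List.pyGet? r col = some v := by
      cases hg : PySem.List.pyGet? r col with
      | none => exact absurd ((PySem.List.pyGet?_eq_none_iff _ _).mp hg) (not_not_intro hr)
      | some v => exact ⟨v, rfl⟩
    by_cases hz : v = 0
    · simp [pvGather, hv, hz, pvCell]
    · simp [pvGather, hv, hz, pvCell,
        ih (fun x hx => h x (by simp [hx]))]

lemma pvIndex?_eq_takeWhile_length :
    ∀ (l : List Int), 0 ∈ l →
      PySem.List.index? l 0 = some ((l.takeWhile (fun v => decide (v ≠ 0))).length) := by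
  intro l h
  induction l with
  | nil => simp at h
  | cons a l ih =>
    by_cases ha : a = 0
    · subst ha
      rw [PySem.List.index?_cons_self]
      simp [List.takeWhile]
    · have h0 : 0 ∈ l := by
        rcases List.mem_cons.mp h with h' | h'
        · exact absurd h'.symm ha
        · exact h'
      rw [PySem.List.index?_cons_of_ne l ha, ih h0]
      simp [List.takeWhile, ha]

lemma pvAltCount_append_singleton :
    ∀ (l : List Int) (x : Int),
      pvAltCount (l ++ [x])
        = pvAltCount l + (match l.getLast? with
                          | none => 0
                          | some y => if y ≠ x then 1 else 0) := by
  intro l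
  induction l with
  | nil => intro x; simp [pvAltCount]
  | cons a l ih =>
    intro x
    cases l with
    | nil => simp [pvAltCount]
    | cons b t =>
      have : (a :: b :: t) ++ [x] = a :: ((b :: t) ++ [x]) := rfl
      rw [this]
      show (if a ≠ b then 1 else 0) + pvAltCount ((b :: t) ++ [x]) = _
      rw [ih x]
      have hl : (a :: b :: t).getLast? = (b :: t).getLast? := List.getLast?_cons_cons
      rw [hl]
      show _ = (if a ≠ b then 1 else 0) + pvAltCount (b :: t) + _
      ring

lemma pvAltCount_reverse : ∀ (l : List Int), pvAltCount l.reverse = pvAltCount l := by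
  intro l
  induction l with
  | nil => rfl
  | cons a l ih =>
    rw [List.reverse_cons, pvAltCount_append_singleton, ih, List.getLast?_reverse]
    cases l with
    | nil => rfl
    | cons b t =>
      simp only [List.head?_cons]
      show pvAltCount (b :: t) + (if b ≠ a then 1 else 0)
          = (if a ≠ b then 1 else 0) + pvAltCount (b :: t)
      by_cases hab : a = b
      · subst hab; ring
      · rw [if_pos hab, if_pos (Ne.symm hab)]; ring

-- B's run is the reverse of the bottom-up nonzero run of the column.
lemma pvRun_eq (c : List Int) :
    (PySem.List.slice c
        (some (if c.contains 0 then
                 (c.length : Int) - (((PySem.List.index? c.reverse 0).getD 0 : Nat) : Int)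
               else 0)) none)
      = ((c.reverse.takeWhile (fun v => decide (v ≠ 0))).reverse) := by
  set p : Int → Bool := fun v => decide (v ≠ 0) with hp
  by_cases hm : (0 : Int) ∈ c
  · have hmr : (0 : Int) ∈ c.reverse := by simpa using hm
    have hidx := pvIndex?_eq_takeWhile_length c.reverse hmr
    have hc : c.contains 0 = true := List.contains_iff_mem.mpr hm
    set t := c.reverse.takeWhile p with ht
    have htle : t.length ≤ c.length := by
      have := (List.takeWhile_sublist (l := c.reverse) (p := p)).length_le
      simpa using this
    have hstart : (if c.contains 0 then
        (c.length : Int) - (((PySem.List.index? c.reverse 0).getD 0 : Nat) : Int)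
        else 0) = ((c.length - t.length : Nat) : Int) := by
      rw [hc, if_pos rfl, hidx]
      simp only [Option.getD_some]
      push_cast [Nat.cast_sub htle]
      ring
    rw [hstart, PySem.List.slice_from c (by positivity), Int.toNat_natCast]
    -- drop (len - |t|) c = t.reverse
    have hrev : (c.drop (c.length - t.length)).reverse
        = c.reverse.take (c.length - (c.length - t.length)) := by
      simpa using List.reverse_drop (l := c) (i := c.length - t.length)
    have hk : c.length - (c.length - t.length) = t.length := by omega
    have htake : c.reverse.take t.length = t :=
      (List.prefix_iff_eq_take.mp (List.takeWhile_prefix p)).symm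
    have : (c.drop (c.length - t.length)).reverse = t := by rw [hrev, hk, htake]
    calc c.drop (c.length - t.length)
        = (c.drop (c.length - t.length)).reverse.reverse := by rw [List.reverse_reverse]
      _ = t.reverse := by rw [this]
  · have hc : c.contains 0 = false := by
      by_contra h
      exact hm (List.contains_iff_mem.mp (by simpa using h))
    have htw : c.reverse.takeWhile p = c.reverse := by
      apply List.takeWhile_eq_self_iff.mpr
      intro x hx
      have : x ∈ c := by simpa using hx
      simp [hp]
      rintro rfl
      exact hm this
    rw [hc, if_neg (by simp), htw, List.reverse_reverse]
    simp [PySem.List.slice_from c (a := 0) le_rfl]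

-- ===== VERDICT (by name: the statement is the Claim_ definition above) =====
theorem detect_column_stacking_spec : Claim_equal_detect_column_stacking := by
  intro board col _ hpre
  unfold Spec_detect_column_stacking detect_column_stacking detect_column_stacking_alt
  -- A side: the loop walks the bottom-up run t of the column
  have h1 := pvLoopA_eq_rows board col board.length (le_refl _) 0 0 0
  rw [List.take_length] at h1
  have hpre' : ∀ r ∈ board.reverse, PySem.Raise.InRange r.length col := by
    intro r hr; exact hpre r (by simpa using hr)
  have hg := pvGather_eq_takeWhile col board.reverse hpre'
  rw [List.map_reverse] at hg
  set c := board.map (pvCell col) with hcdef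
  set t := c.reverse.takeWhile (fun v => decide (v ≠ 0)) with htdef
  -- B side: the column is c and the run is t.reverse
  rw [pvColumn?_eq col board hpre]
  simp only [h1, pvLoopRows_eq_gather, hg]
  rw [pvRun_eq c]
  simp [pvAltCount_reverse, htdef]
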